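-- pv_equiv track=rewrite | github.com/TeresitaCaneteL/EjerciciosPython | guia4/contarnum.py | numeros
-- ===== SOURCE A (Python) =====
-- def numeros(vector):
--   p = 0
--   i = 0
--   c = 0
--   r = []
--   for x in range(len(vector)):
--     if(vector[x] % 2 == 0 and vector[x] != 0):
--       p = p + 1
--     if(vector[x] % 2 != 0):
--       i = i + 1
--     if(vector[x] == 0):
--       c = c + 1
--   r.append(p)
--   r.append(i)
--   r.append(c)
--   return r
-- ===== SOURCE B (Python) =====
-- def numeros(vector):
--   odds = sum(1 for x in vector if x % 2 != 0)
--   zeros = vector.count(0)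
--   return [len(vector) - odds - zeros, odds, zeros]
-- ===== Notes on version B (the rewrite author's own statement) =====
-- stated objective: simpler
-- what changed: Replaces the index loop with three branch tests and three mutable counters by two direct count operations (odds via a generator sum, zeros via list.count) and derives the even-nonzero count arithmetically as len - odds - zeros; the C-level count/sum passes beat the interpreted per-element branching.
import Mathlib
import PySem

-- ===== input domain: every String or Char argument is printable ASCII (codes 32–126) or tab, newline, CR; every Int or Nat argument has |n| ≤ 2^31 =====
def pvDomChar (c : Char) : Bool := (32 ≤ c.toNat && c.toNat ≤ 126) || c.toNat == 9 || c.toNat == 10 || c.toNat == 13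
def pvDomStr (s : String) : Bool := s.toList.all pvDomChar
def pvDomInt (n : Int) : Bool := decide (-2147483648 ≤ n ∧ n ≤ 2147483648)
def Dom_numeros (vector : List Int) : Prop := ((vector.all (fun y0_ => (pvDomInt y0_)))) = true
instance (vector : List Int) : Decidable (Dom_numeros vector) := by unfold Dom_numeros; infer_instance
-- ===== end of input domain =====

-- B replaces A's single three-branch counting loop by two direct counts (odds, zeros)
-- and derives the even-nonzero count as len - odds - zeros; objective: simpler.

-- ===== PORT A =====
def numeros (vector : List Int) : List Int :=
  let st := (PySem.List.pyRange 0 (PySem.List.len vector) 1).foldl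
    (fun (s : Int × Int × Int) x =>
      let v := PySem.List.pyGetD vector x 0
      let s1 := if PySem.Int.mod v 2 = 0 ∧ v ≠ 0 then (s.1 + 1, s.2.1, s.2.2) else s
      let s2 := if PySem.Int.mod v 2 ≠ 0 then (s1.1, s1.2.1 + 1, s1.2.2) else s1
      if v = 0 then (s2.1, s2.2.1, s2.2.2 + 1) else s2) (0, 0, 0)
  [st.1, st.2.1, st.2.2]

-- ===== PORT B =====
def numeros_alt (vector : List Int) : List Int :=
  let odds := vector.foldl (fun a x => if PySem.Int.mod x 2 ≠ 0 then a + 1 else a) (0 : Int)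
  let zeros := (PySem.List.count vector 0 : Int)
  [(vector.length : Int) - odds - zeros, odds, zeros]

-- ===== PRECONDITION & SPEC =====
def Spec_numeros (vector : List Int) (out : List Int) : Prop := out = numeros_alt vector
instance (vector : List Int) (out : List Int) : Decidable (Spec_numeros vector out) := by unfold Spec_numeros; infer_instance

-- ===== CLAIM (what is proved, stated in full; the proofs are below) =====
def Claim_equal_numeros : Prop := ∀ (vector : List Int), Dom_numeros vector → Spec_numeros vector (numeros vector)

-- ===== LEMMAS AND PROOFS =====

/-- A's loop body as a named function. -/
def pvStepA (s : Int × Int × Int) (v : Int) : Int × Int × Int :=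
  let s1 := if PySem.Int.mod v 2 = 0 ∧ v ≠ 0 then (s.1 + 1, s.2.1, s.2.2) else s
  let s2 := if PySem.Int.mod v 2 ≠ 0 then (s1.1, s1.2.1 + 1, s1.2.2) else s1
  if v = 0 then (s2.1, s2.2.1, s2.2.2 + 1) else s2

lemma pvFoldA_eq (l : List Int) (p i c : Int) :
    l.foldl pvStepA (p, i, c) =
      (p + (l.countP (fun v => decide (PySem.Int.mod v 2 = 0 ∧ v ≠ 0)) : Int),
       i + (l.countP (fun v => decide (PySem.Int.mod v 2 ≠ 0)) : Int),
       c + (l.count 0 : Int)) := by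
  induction l generalizing p i c with
  | nil => simp
  | cons x xs ih =>
    rw [List.foldl_cons]
    by_cases hv : x = 0
    · have hm : PySem.Int.mod x 2 = 0 := by rw [hv]; decide
      have hstep : pvStepA (p, i, c) x = (p, i, c + 1) := by
        unfold pvStepA
        split_ifs <;> first | rfl | tauto
      have d1 : decide (PySem.Int.mod x 2 = 0 ∧ x ≠ 0) = false :=
        decide_eq_false (fun h => h.2 hv)
      have d2 : decide (PySem.Int.mod x 2 ≠ 0) = false :=
        decide_eq_false (not_not_intro hm)
      have d3 : (x == (0 : Int)) = true := beq_iff_eq.mpr hv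
      rw [hstep, ih]
      simp only [List.countP_cons, List.count_cons, d1, d2, d3, if_true,
        if_false, Prod.mk.injEq, Bool.false_eq_true]
      omega
    · by_cases hm : PySem.Int.mod x 2 = 0
      · have hstep : pvStepA (p, i, c) x = (p + 1, i, c) := by
          unfold pvStepA
          split_ifs <;> first | rfl | tauto
        have d1 : decide (PySem.Int.mod x 2 = 0 ∧ x ≠ 0) = true :=
          decide_eq_true ⟨hm, hv⟩
        have d2 : decide (PySem.Int.mod x 2 ≠ 0) = false :=
          decide_eq_false (not_not_intro hm)
        have d3 : (x == (0 : Int)) = false := beq_eq_false_iff_ne.mpr hv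
        rw [hstep, ih]
        simp only [List.countP_cons, List.count_cons, d1, d2, d3, if_true,
          if_false, Prod.mk.injEq, Bool.false_eq_true]
        omega
      · have hstep : pvStepA (p, i, c) x = (p, i + 1, c) := by
          unfold pvStepA
          split_ifs <;> first | rfl | tauto
        have d1 : decide (PySem.Int.mod x 2 = 0 ∧ x ≠ 0) = false :=
          decide_eq_false (fun h => hm h.1)
        have d2 : decide (PySem.Int.mod x 2 ≠ 0) = true := decide_eq_true hm
        have d3 : (x == (0 : Int)) = false := beq_eq_false_iff_ne.mpr hv
        rw [hstep, ih]
        simp only [List.countP_cons, List.count_cons, d1, d2, d3, if_true,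
          if_false, Prod.mk.injEq, Bool.false_eq_true]
        omega

lemma pv_partition (l : List Int) :
    (l.countP (fun v => decide (PySem.Int.mod v 2 = 0 ∧ v ≠ 0)) : Int) +
      (l.countP (fun v => decide (PySem.Int.mod v 2 ≠ 0)) : Int) +
      (l.count 0 : Int) = (l.length : Int) := by
  induction l with
  | nil => simp
  | cons x xs ih =>
    simp only [List.countP_cons, List.count_cons, List.length_cons]
    rcases eq_or_ne x 0 with hx | hx
    · subst hx
      have : PySem.Int.mod (0 : Int) 2 = 0 := by decide
      simp_all
      omega
    · rcases eq_or_ne (PySem.Int.mod x 2) 0 with hm | hm <;>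
        · simp_all
          omega

-- ===== VERDICT (by name: the statement is the Claim_ definition above) =====
theorem numeros_spec : Claim_equal_numeros := by
  intro vector _
  show numeros vector = numeros_alt vector
  have hA : numeros vector =
      [(vector.countP (fun v => decide (PySem.Int.mod v 2 = 0 ∧ v ≠ 0)) : Int),
       (vector.countP (fun v => decide (PySem.Int.mod v 2 ≠ 0)) : Int),
       (vector.count 0 : Int)] := by
    show [_, _, _] = _
    rw [show (fun (s : Int × Int × Int) x =>
        let v := PySem.List.pyGetD vector x 0
        let s1 := if PySem.Int.mod v 2 = 0 ∧ v ≠ 0 then (s.1 + 1, s.2.1, s.2.2) else s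
        let s2 := if PySem.Int.mod v 2 ≠ 0 then (s1.1, s1.2.1 + 1, s1.2.2) else s1
        if v = 0 then (s2.1, s2.2.1, s2.2.2 + 1) else s2) =
        (fun s x => pvStepA s (PySem.List.pyGetD vector x 0)) from rfl]
    rw [PySem.List.foldl_pyRange_zero_pyGetD vector 0 (fun s x => pvStepA s x) ((0,0,0) : Int × Int × Int)]
    simp [pvFoldA_eq]
  have hB : numeros_alt vector =
      [(vector.length : Int) - (vector.countP (fun v => decide (PySem.Int.mod v 2 ≠ 0)) : Int)
         - (vector.count 0 : Int),
       (vector.countP (fun v => decide (PySem.Int.mod v 2 ≠ 0)) : Int),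
       (vector.count 0 : Int)] := by
    show [_, _, _] = _
    rw [PySem.List.foldl_ite_add_one, PySem.List.count_eq]
    simp
  rw [hA, hB]
  have := pv_partition vector
  simp only [List.cons.injEq, and_true]
  omega
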